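-- pv_equiv track=rewrite | github.com/zhuangzard/arxiv-scout | generate-html.py | restore_math
-- ===== SOURCE A (Python) =====
-- def restore_math(html_text, placeholders):
--     """Restore LaTeX from placeholders into KaTeX-compatible HTML spans."""
--     for idx, (kind, latex) in enumerate(placeholders):
--         token = f'MATH_PLACEHOLDER_{idx}'
--         # Escape HTML entities in latex that markdown might have mangled
--         latex_clean = latex.replace('&amp;', '&').replace('&lt;', '<').replace('&gt;', '>')
--         if kind == 'display':
--             replacement = f'<div class="katex-display">\\[{latex_clean}\\]</div>'
--         else:
--             replacement = f'<span class="katex-inline">\\({latex_clean}\\)</span>'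
--         html_text = html_text.replace(f'<p>{token}</p>', replacement)
--         html_text = html_text.replace(token, replacement)
--     return html_text
-- ===== SOURCE B (Python) =====
-- def restore_math(html_text, placeholders):
--     """Restore LaTeX from placeholders into KaTeX-compatible HTML spans."""
--     for idx, (kind, latex) in enumerate(placeholders):
--         latex_clean = latex.replace('&amp;', '&').replace('&lt;', '<').replace('&gt;', '>')
--         if kind == 'display':
--             rep = '<div class="katex-display">\\[' + latex_clean + '\\]</div>'
--         else:
--             rep = '<span class="katex-inline">\\(' + latex_clean + '\\)</span>'
--         token = 'MATH_PLACEHOLDER_%d' % idx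
--         parts = []
--         i = 0
--         while True:
--             j = html_text.find(token, i)
--             if j == -1:
--                 parts.append(html_text[i:])
--                 break
--             if j - 3 >= i and html_text.startswith('<p>', j - 3) and html_text.startswith('</p>', j + len(token)):
--                 parts.append(html_text[i:j - 3])
--                 i = j + len(token) + 4
--             else:
--                 parts.append(html_text[i:j])
--                 i = j + len(token)
--             parts.append(rep)
--         html_text = ''.join(parts)
--     return html_text
-- ===== Notes on version B (the rewrite author's own statement) =====
-- stated objective: faster
-- what changed: A builds '<p>token</p>' and runs two full str.replace passes per placeholder (wrapped then bare, allocating an intermediate string); B makes a single find-driven pass per placeholder that emits chunks and decides wrapped-vs-bare at each found token by inspecting its context, joining the chunks once.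
import Mathlib
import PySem

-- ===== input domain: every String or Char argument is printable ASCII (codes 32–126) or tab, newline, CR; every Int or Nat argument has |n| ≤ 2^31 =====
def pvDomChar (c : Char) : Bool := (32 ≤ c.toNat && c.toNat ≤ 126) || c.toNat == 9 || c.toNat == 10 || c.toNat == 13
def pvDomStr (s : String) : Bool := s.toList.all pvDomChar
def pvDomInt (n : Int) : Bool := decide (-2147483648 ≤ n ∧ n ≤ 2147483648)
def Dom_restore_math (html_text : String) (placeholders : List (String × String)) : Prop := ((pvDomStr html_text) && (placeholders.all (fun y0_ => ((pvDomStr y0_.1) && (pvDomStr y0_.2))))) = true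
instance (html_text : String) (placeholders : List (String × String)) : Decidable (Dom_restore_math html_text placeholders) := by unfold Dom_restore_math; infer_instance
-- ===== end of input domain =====

-- B fuses A's two str.replace passes per placeholder into one find-driven scan over the text
-- (no '<p>…</p>' pattern string, no intermediate copy); equivalence proved for all inputs
-- where no placeholder's latex contains the internal token text 'MATH_PLACEHOLDER_'.

-- ===== PORT A =====
def restore_math (html_text : String) (placeholders : List (String × String)) : String :=
  List.foldl (fun h (pr : Int × (String × String)) =>
      let token : String := "MATH_PLACEHOLDER_" ++ PySem.Int.toStr pr.1
      let latex_clean : String :=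
        PySem.Str.replace (PySem.Str.replace (PySem.Str.replace pr.2.2 "&amp;" "&") "&lt;" "<") "&gt;" ">"
      let replacement : String :=
        if pr.2.1 == "display" then
          "<div class=\"katex-display\">\\[" ++ latex_clean ++ "\\]</div>"
        else
          "<span class=\"katex-inline\">\\(" ++ latex_clean ++ "\\)</span>"
      PySem.Str.replace (PySem.Str.replace h ("<p>" ++ token ++ "</p>") replacement) token replacement)
    html_text (PySem.List.enumerate placeholders)

-- ===== PORT B =====
-- B's inner while-loop: `parts` is accumulated in reverse (Python appends, the port conses);
-- `html_text.find(token, i)` is PySem.Chars.findFrom, `html_text.startswith(pat, k)` (0 ≤ k ≤ len)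
-- is PySem.Chars.startswith on `s.drop k` (exact there), slices are PySem.List.slice.
-- The fuel argument (s.length + 1) only bounds the iteration count: each iteration advances
-- i by at least len(token) ≥ 1, so it is never exhausted.
def bLoop (tok rep s : List Char) : Nat → Nat → List (List Char) → List (List Char)
  | 0, i, parts => PySem.List.slice s (some (i : Int)) none :: parts
  | fuel + 1, i, parts =>
    let j : Int := PySem.Chars.findFrom s tok (i : Int)
    if j = -1 then PySem.List.slice s (some (i : Int)) none :: parts
    else if (i : Int) + 3 ≤ j
            && PySem.Chars.startswith (s.drop (j.toNat - 3)) ['<', 'p', '>']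
            && PySem.Chars.startswith (s.drop (j.toNat + tok.length)) ['<', '/', 'p', '>'] then
      bLoop tok rep s fuel (j.toNat + tok.length + 4)
        (rep :: PySem.List.slice s (some (i : Int)) (some (j - 3)) :: parts)
    else
      bLoop tok rep s fuel (j.toNat + tok.length)
        (rep :: PySem.List.slice s (some (i : Int)) (some j) :: parts)

def restore_math_alt (html_text : String) (placeholders : List (String × String)) : String :=
  String.ofList <|
    List.foldl (fun h (pr : Int × (String × String)) =>
        let latex_clean : List Char :=
          PySem.Chars.replace (PySem.Chars.replace (PySem.Chars.replace pr.2.2.toList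
            "&amp;".toList "&".toList) "&lt;".toList "<".toList) "&gt;".toList ">".toList
        let rep : List Char :=
          if pr.2.1 == "display" then
            "<div class=\"katex-display\">\\[".toList ++ latex_clean ++ "\\]</div>".toList
          else
            "<span class=\"katex-inline\">\\(".toList ++ latex_clean ++ "\\)</span>".toList
        let tok : List Char := "MATH_PLACEHOLDER_".toList ++ PySem.Int.toChars pr.1
        (bLoop tok rep h (h.length + 1) 0 []).reverse.flatten)
      html_text.toList (PySem.List.enumerate placeholders)

-- ===== PRECONDITION & SPEC =====
-- Pre_ excludes inputs where some placeholder's latex itself contains the internal token text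
-- 'MATH_PLACEHOLDER_' while the html also contains it (so a replacement can actually fire):
-- there A rescans its own inserted replacements (an accident of sequential str.replace),
-- which is as defensible as B's not rescanning them.
def Pre_restore_math (html_text : String) (placeholders : List (String × String)) : Prop :=
  (∀ p ∈ placeholders, PySem.Str.isIn "MATH_PLACEHOLDER_" p.2 = false)
    ∨ PySem.Str.isIn "MATH_PLACEHOLDER_" html_text = false
instance (html_text : String) (placeholders : List (String × String)) : Decidable (Pre_restore_math html_text placeholders) := by unfold Pre_restore_math; infer_instance
def pvWitness_restore_math : String × (List (String × String)) :=
  ("<p>MATH_PLACEHOLDER_0</p> and MATH_PLACEHOLDER_1.", [("display", "a+b"), ("inline", "x&lt;y")])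
def Spec_restore_math (html_text : String) (placeholders : List (String × String)) (out : String) : Prop := out = restore_math_alt html_text placeholders
instance (html_text : String) (placeholders : List (String × String)) (out : String) : Decidable (Spec_restore_math html_text placeholders out) := by unfold Spec_restore_math; infer_instance

-- ===== CLAIM (what is proved, stated in full; the proofs are below) =====
def Claim_equal_restore_math : Prop := ∀ (html_text : String) (placeholders : List (String × String)), Dom_restore_math html_text placeholders → Pre_restore_math html_text placeholders → Spec_restore_math html_text placeholders (restore_math html_text placeholders)

-- ===== LEMMAS AND PROOFS =====

def repl (old new : List Char) : List Char → List Char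
  | [] => []
  | c :: t =>
    if old.isPrefixOf (c :: t) then new ++ repl old new (t.drop (old.length - 1))
    else c :: repl old new t
termination_by l => l.length
decreasing_by
  · simp only [List.length_drop, List.length_cons]; omega
  · simp [List.length_cons]
theorem repl_nil (old new : List Char) : repl old new [] = [] := by simp [repl]
theorem repl_pos (old new s : List Char) (ho : old ≠ []) (hp : old <+: s) :
    repl old new s = new ++ repl old new (s.drop old.length) := by
  cases s with
  | nil => cases ho (List.prefix_nil.mp hp)
  | cons c t =>
    rw [repl, if_pos (List.isPrefixOf_iff_prefix.mpr hp)]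
    congr 2
    cases old with
    | nil => cases ho rfl
    | cons o os => simp
theorem repl_neg (old new : List Char) (c : Char) (t : List Char) (hp : ¬ old <+: (c :: t)) :
    repl old new (c :: t) = c :: repl old new t := by
  rw [repl, if_neg (by simpa [List.isPrefixOf_iff_prefix] using hp)]

theorem goBridge (old new : List Char) (ho : old ≠ []) :
    ∀ fuel l acc, l.length ≤ fuel →
      PySem.Chars.replace.go old new fuel l acc = acc.reverse ++ repl old new l := by
  intro fuel
  induction fuel with
  | zero =>
    intro l acc hl
    have : l = [] := List.eq_nil_of_length_eq_zero (by omega)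
    subst this
    simp [PySem.Chars.replace.go, repl_nil]
  | succ f ih =>
    intro l acc hl
    cases l with
    | nil => simp [PySem.Chars.replace.go, repl_nil]
    | cons c t =>
      rw [PySem.Chars.replace.go]
      by_cases hp : old <+: (c :: t)
      · have h1 : 1 ≤ old.length := List.length_pos_iff.mpr ho
        rw [if_pos (List.isPrefixOf_iff_prefix.mpr hp)]
        rw [ih _ _ (by simp only [List.length_drop, List.length_cons] at *; omega)]
        rw [repl_pos old new _ ho hp]
        simp
      · rw [if_neg (by simpa [List.isPrefixOf_iff_prefix] using hp)]
        rw [ih _ _ (by simp at hl ⊢; omega)]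
        rw [repl_neg old new c t hp]
        simp

theorem replace_eq_repl (s old new : List Char) (ho : old ≠ []) :
    PySem.Chars.replace s old new = repl old new s := by
  rw [PySem.Chars.replace, if_neg (by simpa [List.isEmpty_iff] using ho)]
  simpa using goBridge old new ho s.length s [] (le_refl _)

-- prefix of an append, split form
theorem prefix_append_split {a b l : List Char} :
    (a ++ b) <+: l ↔ a <+: l ∧ b <+: l.drop a.length := by
  constructor
  · rintro ⟨t, rfl⟩
    refine ⟨⟨b ++ t, by simp⟩, ?_⟩
    rw [List.append_assoc, List.drop_left]
    exact ⟨t, rfl⟩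
  · rintro ⟨ha, hb⟩
    have h1 : l = a ++ l.drop a.length := List.prefix_append_drop ha
    obtain ⟨t, ht⟩ := hb
    exact ⟨t, by rw [List.append_assoc, ht]; exact h1.symm⟩

-- a nonempty infix of u++v avoiding u's characters is an infix of v
theorem infix_append_right {q u v : List Char} (hq : q ≠ [])
    (h : q <:+: u ++ v) (hu : ∀ c ∈ u, c ∉ q) : q <:+: v := by
  induction u with
  | nil => simpa using h
  | cons c u' ih =>
    rw [List.cons_append, List.infix_cons_iff] at h
    rcases h with h | h
    · obtain ⟨t, ht⟩ := h
      cases q with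
      | nil => cases hq rfl
      | cons q0 qs =>
        have : q0 = c := by simpa using congrArg (·.head?) ht
        exact absurd (this ▸ List.mem_cons_self) (fun hm => hu c List.mem_cons_self hm)
    · exact ih h (fun d hd => hu d (List.mem_cons_of_mem c hd))

theorem infix_append_left {q u v : List Char} (hq : q ≠ [])
    (h : q <:+: u ++ v) (hv : ∀ c ∈ v, c ∉ q) : q <:+: u := by
  have h' : q.reverse <:+: v.reverse ++ u.reverse := by
    rw [← List.reverse_append]
    exact List.reverse_infix.mpr h
  have := infix_append_right (by simpa using hq) h'
    (fun c hc hm => hv c (List.mem_reverse.mp hc) (List.mem_reverse.mp hm))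
  simpa using List.reverse_infix.mp (by simpa using this)

-- a prefix of `repl old new u` that avoids new's head is a prefix of u
theorem prefix_repl {old new u q : List Char} (hn : new ≠ [])
    (hh : ∀ c ∈ q, c ≠ new.head hn)
    (h : q <+: repl old new u) : q <+: u := by
  induction u using repl.induct old generalizing q with
  | case1 => simpa [repl_nil] using h
  | case2 c t hp ih =>
    rw [repl, if_pos hp] at h
    cases q with
    | nil => exact List.nil_prefix
    | cons q0 qs =>
      obtain ⟨t', ht'⟩ := h
      have : q0 = new.head hn := by
        cases new with
        | nil => cases hn rfl
        | cons n0 ns => simpa using congrArg (·.head?) ht'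
      exact absurd this (hh q0 List.mem_cons_self)
  | case3 c t hp ih =>
    rw [repl, if_neg hp] at h
    cases q with
    | nil => exact List.nil_prefix
    | cons q0 qs =>
      rw [List.cons_prefix_cons] at h ⊢
      exact ⟨h.1, ih (fun d hd => hh d (List.mem_cons_of_mem _ hd)) h.2⟩

-- a nonempty infix of `repl old new u` avoiding new's characters is an infix of u
theorem infix_repl {old new u q : List Char} (hq : q ≠ [])
    (hn : new ≠ []) (hnc : ∀ c ∈ new, c ∉ q)
    (h : q <:+: repl old new u) : q <:+: u := by
  induction u using repl.induct old with
  | case1 => simpa [repl_nil] using h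
  | case2 c t hp ih =>
    rw [repl, if_pos hp] at h
    have h2 : q <:+: repl old new (t.drop (old.length - 1)) :=
      infix_append_right hq h (fun c hc hm => hnc c hc hm)
    have h3 := ih h2
    have hpre : old <+: c :: t := List.isPrefixOf_iff_prefix.mp hp
    calc q <:+: t.drop (old.length - 1) := h3
      _ <:+: c :: t := by
          have : t.drop (old.length - 1) <:+ t := List.drop_suffix _ _
          exact this.isInfix.trans (List.infix_cons_iff.mpr (Or.inr (List.infix_refl t)))
  | case3 c t hp ih =>
    rw [repl, if_neg hp] at h
    rw [List.infix_cons_iff] at h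
    rcases h with h | h
    · cases q with
      | nil => cases hq rfl
      | cons q0 qs =>
        rw [List.cons_prefix_cons] at h
        have h2 : qs <+: t := prefix_repl hn
          (fun d hd hdh => by
            have : new.head hn ∈ new := List.head_mem hn
            exact hnc _ this (hdh ▸ List.mem_cons_of_mem q0 hd)) h.2
        exact List.infix_cons_iff.mpr (Or.inl (List.cons_prefix_cons.mpr ⟨h.1, h2⟩))
    · exact (ih h).trans (List.infix_cons_iff.mpr (Or.inr (List.infix_refl t)))

-- L2: repl tok passes over a block `rep` none of whose suffixes starts tok
theorem repl_skip_block {tok rep' rep x : List Char}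
    (h1 : ∀ r', r' ≠ [] → r' <:+ rep → ¬ tok <+: (r' ++ x)) :
    repl tok rep' (rep ++ x) = rep ++ repl tok rep' x := by
  induction rep with
  | nil => simp
  | cons d r ih =>
    rw [List.cons_append, repl_neg]
    · rw [ih (fun r' hr' hsuf => h1 r' hr' (hsuf.trans (List.suffix_cons d r)))]; simp
    · exact h1 (d :: r) (by simp) (List.suffix_refl _)

theorem repl_skip_block' {tok rep' rep x : List Char} (hni : ¬ tok <:+: rep) (hgt : rep.getLast? = some '>')
    (hno : '>' ∉ tok) :
    repl tok rep' (rep ++ x) = rep ++ repl tok rep' x := by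
  apply repl_skip_block
  intro r' hr' hsuf htp
  by_cases hlen : tok.length ≤ r'.length
  · have : tok <+: r' := List.prefix_of_prefix_length_le htp (r'.prefix_append x) hlen
    exact hni (this.isInfix.trans hsuf.isInfix)
  · have hpr : r' <+: tok :=
      List.prefix_of_prefix_length_le (r'.prefix_append x) htp (by omega)
    have hlast : r'.getLast? = some '>' := by
      obtain ⟨u, rfl⟩ := hsuf
      rw [← hgt, List.getLast?_append_of_ne_nil u hr']
    exact hno (hpr.subset (List.mem_of_getLast? hlast))

-- L3: repl old passes over a block none of whose characters equals old's head
theorem repl_skip_chars {old new q u : List Char} (ho : old ≠ [])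
    (hq : ∀ c ∈ q, c ≠ old.head ho) :
    repl old new (q ++ u) = q ++ repl old new u := by
  induction q with
  | nil => simp
  | cons d r ih =>
    rw [List.cons_append, repl_neg, ih (fun c hc => hq c (List.mem_cons_of_mem d hc))]
    · simp
    · intro hp
      have : old.head ho = d := by
        cases old with
        | nil => cases ho rfl
        | cons o os =>
          obtain ⟨t, ht⟩ := hp
          simpa using (congrArg (·.head?) ht)
      exact hq d List.mem_cons_self this.symm

-- single left-to-right scan replacing the wrapped pattern w or tok, w preferred
def scanC (w tok rep : List Char) : List Char → List Char
  | [] => []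
  | c :: t =>
    if w.isPrefixOf (c :: t) then rep ++ scanC w tok rep (t.drop (w.length - 1))
    else if tok.isPrefixOf (c :: t) then rep ++ scanC w tok rep (t.drop (tok.length - 1))
    else c :: scanC w tok rep t
termination_by l => l.length
decreasing_by
  · simp only [List.length_drop, List.length_cons]; omega
  · simp only [List.length_drop, List.length_cons]; omega
  · simp [List.length_cons]

theorem scanC_nil (w tok rep : List Char) : scanC w tok rep [] = [] := by simp [scanC]

theorem scanC_pos_w (w tok rep s : List Char) (hw : w ≠ []) (h : w <+: s) (hs : s ≠ []) :
    scanC w tok rep s = rep ++ scanC w tok rep (s.drop w.length) := by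
  cases s with
  | nil => cases hs rfl
  | cons c t =>
    rw [scanC, if_pos (List.isPrefixOf_iff_prefix.mpr h)]
    congr 2
    cases w with
    | nil => cases hw rfl
    | cons a b => simp

theorem scanC_pos_t (w tok rep s : List Char) (htok : tok ≠ [])
    (h1 : ¬ w <+: s) (h2 : tok <+: s) :
    scanC w tok rep s = rep ++ scanC w tok rep (s.drop tok.length) := by
  cases s with
  | nil => cases htok (List.prefix_nil.mp h2)
  | cons c t =>
    rw [scanC, if_neg (by simpa [List.isPrefixOf_iff_prefix] using h1),
      if_pos (List.isPrefixOf_iff_prefix.mpr h2)]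
    congr 2
    cases tok with
    | nil => cases htok rfl
    | cons a b => simp

theorem scanC_neg (w tok rep : List Char) (c : Char) (t : List Char)
    (h1 : ¬ w <+: (c :: t)) (h2 : ¬ tok <+: (c :: t)) :
    scanC w tok rep (c :: t) = c :: scanC w tok rep t := by
  rw [scanC, if_neg (by simpa [List.isPrefixOf_iff_prefix] using h1),
    if_neg (by simpa [List.isPrefixOf_iff_prefix] using h2)]

-- no token occurrence at all: scanC is the identity (w contains tok, so w can't match either)
theorem scanC_id {w tok rep u : List Char} (a b : List Char) (hw : w = a ++ (tok ++ b))
    (h : ¬ tok <:+: u) : scanC w tok rep u = u := by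
  induction u with
  | nil => exact scanC_nil _ _ _
  | cons c t ih =>
    rw [scanC_neg, ih (fun hi => h (hi.trans (List.infix_cons_iff.mpr (Or.inr (List.infix_refl t)))))]
    · intro hp
      subst hw
      have h2 : tok <:+: c :: t := by
        have h3 : (tok ++ b) <+: List.drop a.length (c :: t) := (prefix_append_split.mp hp).2
        have h4 : tok <+: List.drop a.length (c :: t) := (tok.prefix_append b).trans h3
        exact h4.isInfix.trans (List.drop_suffix _ _).isInfix
      exact h h2
    · exact fun hp => h hp.isInfix

-- no occurrence of the pattern: repl is the identity
theorem repl_id {old new s : List Char} (h : ¬ old <:+: s) : repl old new s = s := by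
  induction s with
  | nil => exact repl_nil _ _
  | cons c t ih =>
    rw [repl_neg old new c t (fun hp => h hp.isInfix),
      ih (fun hi => h (hi.trans (List.infix_cons_iff.mpr (Or.inr (List.infix_refl t)))))]

-- P2: A's two replace passes (wrapped pattern w first, then tok) equal one combined scan
theorem fuse_aux (w tok rep : List Char)
    (hw : w ≠ []) (hwh : w.head? = some '<') (htok : tok ≠ [])
    (hlt : '<' ∉ tok) (hgt : '>' ∉ tok)
    (hni : ¬ tok <:+: rep)
    (hrh : rep.head? = some '<') (hrl : rep.getLast? = some '>') :
    ∀ n (s : List Char), s.length ≤ n →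
      repl tok rep (repl w rep s) = scanC w tok rep s := by
  have hrep : rep ≠ [] := by intro h; simp [h] at hrh
  have hwhead : w.head hw = '<' := by
    rw [List.head?_eq_some_head hw] at hwh; exact Option.some_inj.mp hwh
  have hrhead : rep.head hrep = '<' := by
    rw [List.head?_eq_some_head hrep] at hrh; exact Option.some_inj.mp hrh
  intro n
  induction n with
  | zero =>
    intro s hs
    have : s = [] := List.eq_nil_of_length_eq_zero (by omega)
    subst this; simp [repl_nil, scanC_nil]
  | succ m ih =>
    intro s hs
    cases s with
    | nil => simp [repl_nil, scanC_nil]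
    | cons c t =>
    by_cases h1 : w <+: (c :: t)
    · rw [repl_pos w rep _ hw h1]
      rw [repl_skip_block' hni hrl hgt]
      rw [ih _ (by have : 1 ≤ w.length := List.length_pos_iff.mpr hw
                   simp only [List.length_drop, List.length_cons] at *; omega)]
      rw [scanC_pos_w w tok rep _ hw h1 (by simp)]
    · by_cases h2 : tok <+: (c :: t)
      · have hdec := List.prefix_append_drop h2
        calc repl tok rep (repl w rep (c :: t))
            = repl tok rep (repl w rep (tok ++ (c :: t).drop tok.length)) := by rw [← hdec]
          _ = repl tok rep (tok ++ repl w rep ((c :: t).drop tok.length)) := by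
              rw [repl_skip_chars hw (fun d hd hdh => by
                rw [hdh, hwhead] at hd; exact hlt hd)]
          _ = rep ++ repl tok rep ((c :: t).drop tok.length |> repl w rep) := by
              rw [repl_pos tok rep _ htok (tok.prefix_append _), List.drop_left]
          _ = rep ++ scanC w tok rep ((c :: t).drop tok.length) := by
              rw [ih _ (by have : 1 ≤ tok.length := List.length_pos_iff.mpr htok
                           simp only [List.length_drop, List.length_cons] at *; omega)]
          _ = scanC w tok rep (c :: t) := (scanC_pos_t w tok rep _ htok h1 h2).symm
      · rw [repl_neg w rep c t h1, repl_neg tok rep c _, ih t (by simp at hs; omega),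
          scanC_neg w tok rep c t h1 h2]
        intro hp
        cases tok with
        | nil => exact htok rfl
        | cons tc ts =>
          rw [List.cons_prefix_cons] at hp
          have h3 : ts <+: t := prefix_repl hrep
            (fun d hd hdh => by
              rw [hdh, hrhead] at hd
              exact hlt (List.mem_cons_of_mem tc hd)) hp.2
          exact h2 (List.cons_prefix_cons.mpr ⟨hp.1, h3⟩)



-- scanC copies a block in which neither pattern ever starts
theorem scanC_copy {w tok rep : List Char} (m v : List Char)
    (h : ∀ q < m.length, ¬ w <+: (m ++ v).drop q ∧ ¬ tok <+: (m ++ v).drop q) :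
    scanC w tok rep (m ++ v) = m ++ scanC w tok rep v := by
  induction m with
  | nil => simp
  | cons c m' ih =>
    rw [List.cons_append, scanC_neg _ _ _ _ _
      (by simpa using (h 0 (by simp)).1) (by simpa using (h 0 (by simp)).2),
      ih (fun q hq => by simpa using h (q + 1) (by simp; omega))]
    simp

-- the find-driven loop of B computes the combined scan
theorem bLoop_eq (tok rep s : List Char)
    (htok : tok ≠ []) (hlt : '<' ∉ tok) (hgt : '>' ∉ tok) (hpt : 'p' ∉ tok) :
    ∀ fuel i parts, i ≤ s.length → s.length - i < fuel →
      (bLoop tok rep s fuel i parts).reverse.flatten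
        = parts.reverse.flatten
            ++ scanC ('<' :: 'p' :: '>' :: (tok ++ ['<', '/', 'p', '>'])) tok rep (s.drop i) := by
  intro fuel
  set w : List Char := '<' :: 'p' :: '>' :: (tok ++ ['<', '/', 'p', '>']) with hw
  induction fuel with
  | zero => intro i parts h1 h2; omega
  | succ f ih =>
    intro i parts hi hfuel
    rw [bLoop]
    by_cases hj : PySem.Chars.findFrom s tok (i : Int) = -1
    · rw [if_pos hj]
      have hni : ¬ tok <:+: s.drop i :=
        (PySem.Chars.findFrom_natCast_eq_neg_one_iff s tok i hi).mp hj
      rw [scanC_id ['<', 'p', '>'] ['<', '/', 'p', '>'] (by simp [hw]) hni]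
      simp [PySem.List.slice_from s (by positivity : (0:Int) ≤ (i:Int))]
    · rw [if_neg hj]
      obtain ⟨hile, hpref, hmin⟩ := PySem.Chars.findFrom_natCast_spec s tok i hi hj
      set j : Int := PySem.Chars.findFrom s tok (i : Int) with hjdef
      set jn : Nat := j.toNat with hjn
      have hj0 : (0:Int) ≤ j := le_trans (by positivity) hile
      have hij : i ≤ jn := by omega
      have hjlen : jn + tok.length ≤ s.length := by
        have := hpref.length_le
        simp only [List.length_drop] at this
        have htl : 1 ≤ tok.length := List.length_pos_iff.mpr htok
        omega
      have htl : 1 ≤ tok.length := List.length_pos_iff.mpr htok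
      have hwsplit : w = ['<', 'p', '>'] ++ (tok ++ ['<', '/', 'p', '>']) := by simp [hw]
      have hwlen : w.length = tok.length + 7 := by simp [hw]
      by_cases hcond : ((i : Int) + 3 ≤ j
          && PySem.Chars.startswith (s.drop (j.toNat - 3)) ['<', 'p', '>']
          && PySem.Chars.startswith (s.drop (j.toNat + tok.length)) ['<', '/', 'p', '>']) = true
      · rw [if_pos hcond]
        simp only [Bool.and_eq_true, decide_eq_true_eq, PySem.Chars.startswith_iff] at hcond
        obtain ⟨⟨hc1, hopen⟩, hclose⟩ := hcond
        have h3 : i + 3 ≤ jn := by omega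
        have hwpre : w <+: s.drop (jn - 3) := by
          rw [hwsplit]
          refine prefix_append_split.mpr ⟨hopen, ?_⟩
          rw [List.drop_drop]
          have e1 : jn - 3 + 3 = jn := by omega
          rw [show (['<','p','>'] : List Char).length = 3 from rfl, e1]
          exact prefix_append_split.mpr ⟨hpref, by rw [List.drop_drop]; exact hclose⟩
        have hquad : jn + tok.length + 4 ≤ s.length := by
          have := hclose.length_le
          simp only [List.length_drop, List.length_cons] at this
          simp at this
          omega
        have hdecomp : s.drop i = (s.drop i).take (jn - 3 - i) ++ s.drop (jn - 3) := by
          conv_lhs => rw [← List.take_append_drop (jn - 3 - i) (s.drop i)]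
          rw [List.drop_drop, show i + (jn - 3 - i) = jn - 3 from by omega]
        have hcopy :
            scanC w tok rep (s.drop i)
              = (s.drop i).take (jn - 3 - i) ++ (rep ++ scanC w tok rep (s.drop (jn + tok.length + 4))) := by
          have hcp : ∀ q < ((s.drop i).take (jn - 3 - i)).length,
              ¬ w <+: ((s.drop i).take (jn - 3 - i) ++ s.drop (jn - 3)).drop q
                ∧ ¬ tok <+: ((s.drop i).take (jn - 3 - i) ++ s.drop (jn - 3)).drop q := by
            intro q hq
            have hqlen : q < jn - 3 - i := by
              simp only [List.length_take, List.length_drop] at hq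
              omega
            rw [← hdecomp, List.drop_drop]
            constructor
            · intro hwp
              rw [hwsplit] at hwp
              have := (prefix_append_split.mp hwp).2
              rw [List.drop_drop, show (['<','p','>'] : List Char).length = 3 from rfl] at this
              exact hmin (i + q + 3) (by omega) (by omega) ((tok.prefix_append _).trans this)
            · exact fun hwp => hmin (i + q) (by omega) (by omega) hwp
          conv_lhs => rw [hdecomp]
          rw [scanC_copy _ _ hcp]
          rw [scanC_pos_w w tok rep _ (by simp [hw]) hwpre
            (by intro hnil; have := congrArg List.length hnil
                simp at this; omega)]
          rw [List.drop_drop, hwlen, show jn - 3 + (tok.length + 7) = jn + tok.length + 4 from by omega]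
        have hslice : PySem.List.slice s (some (i : Int)) (some (j - 3))
            = (s.drop i).take (jn - 3 - i) := by
          rw [PySem.List.slice_toNat s (by positivity) (by omega : (0:Int) ≤ j - 3)]
          congr 1
          omega
        rw [ih (jn + tok.length + 4) _ (by omega) (by omega)]
        rw [hcopy, hslice]
        simp [List.append_assoc]
      · rw [if_neg hcond]
        have hbare :
            scanC w tok rep (s.drop i)
              = (s.drop i).take (jn - i) ++ (rep ++ scanC w tok rep (s.drop (jn + tok.length))) := by
          have hdecomp : s.drop i = (s.drop i).take (jn - i) ++ s.drop jn := by
            conv_lhs => rw [← List.take_append_drop (jn - i) (s.drop i)]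
            rw [List.drop_drop, show i + (jn - i) = jn from by omega]
          have hcp : ∀ q < ((s.drop i).take (jn - i)).length,
              ¬ w <+: ((s.drop i).take (jn - i) ++ s.drop jn).drop q
                ∧ ¬ tok <+: ((s.drop i).take (jn - i) ++ s.drop jn).drop q := by
            intro q hq
            have hqlen : q < jn - i := by
              simp only [List.length_take, List.length_drop] at hq
              omega
            rw [← hdecomp, List.drop_drop]
            refine ⟨?_, fun hwp => hmin (i + q) (by omega) (by omega) hwp⟩
            intro hwp
            rw [hwsplit] at hwp
            obtain ⟨hopen, hrest⟩ := prefix_append_split.mp hwp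
            rw [List.drop_drop, show (['<','p','>'] : List Char).length = 3 from rfl] at hrest
            obtain ⟨htk, hcl⟩ := prefix_append_split.mp hrest
            by_cases hqr : i + q + 3 < jn
            · exact hmin (i + q + 3) (by omega) hqr htk
            · -- i + q < jn ≤ i + q + 3: a '<p>'-match would overlap the token at jn
              have hcases : jn - (i + q) = 1 ∨ jn - (i + q) = 2 ∨ jn - (i + q) = 3 := by omega
              rcases hcases with hc | hc | hc
              · -- i + q = jn - 1 : 'p' would be tok's first char
                have h1 : ['p', '>'] <+: s.drop jn := by
                  have := (prefix_append_split.mp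
                    (show (['<'] ++ ['p', '>'] : List Char) <+: (s.drop (i+q)) from hopen)).2
                  rw [List.drop_drop, show (['<'] : List Char).length = 1 from rfl,
                    show i + q + 1 = jn from by omega] at this
                  exact this
                have h2 : ['p'] <+: s.drop jn := (List.prefix_append _ _).trans (by simpa using h1)
                exact hpt ((List.prefix_of_prefix_length_le h2 hpref (by simpa using htl)).subset (by simp))
              · -- i + q = jn - 2 : '>' would be tok's first char
                have h1 : ['>'] <+: s.drop jn := by
                  have := (prefix_append_split.mp
                    (show (['<', 'p'] ++ ['>'] : List Char) <+: (s.drop (i+q)) from hopen)).2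
                  rw [List.drop_drop, show (['<', 'p'] : List Char).length = 2 from rfl,
                    show i + q + 2 = jn from by omega] at this
                  exact this
                exact hgt ((List.prefix_of_prefix_length_le h1 hpref (by simpa using htl)).subset (by simp))
              · -- i + q = jn - 3 : this is exactly the wrapped condition the port found false
                apply absurd ?_ hcond
                simp only [Bool.and_eq_true, decide_eq_true_eq, PySem.Chars.startswith_iff]
                have e3 : j.toNat - 3 = i + q := by omega
                refine ⟨⟨by omega, ?_⟩, ?_⟩
                · rw [e3]; exact hopen
                · rw [show j.toNat + tok.length = i + q + 3 + tok.length from by omega]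
                  rw [List.drop_drop] at hcl
                  exact hcl
          conv_lhs => rw [hdecomp]
          rw [scanC_copy _ _ hcp]
          rw [scanC_pos_t w tok rep _ htok ?_ hpref]
          · rw [List.drop_drop]
          · intro hwp
            rw [hwsplit] at hwp
            have h1 : ['<'] <+: s.drop jn :=
              (List.prefix_append _ _).trans (by simpa using hwp)
            have h2 : ['<'] <+: tok :=
              List.prefix_of_prefix_length_le h1 hpref (by simpa using htl)
            exact hlt (h2.subset (by simp))
        have hslice : PySem.List.slice s (some (i : Int)) (some j)
            = (s.drop i).take (jn - i) := by
          rw [PySem.List.slice_toNat s (by positivity) hj0]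
          congr 1
        rw [ih (jn + tok.length) _ (by omega) (by omega)]
        rw [hbare, hslice]
        simp [List.append_assoc]

-- token characters: uppercase letters, '_' and digits
def okTok (c : Char) : Bool :=
  ('A' ≤ c && c ≤ 'Z') || c = '_' || ('0' ≤ c && c ≤ '9')

theorem okTok_toDigitsCore :
    ∀ (f n : Nat) (acc : List Char), (∀ c ∈ acc, okTok c = true) →
      ∀ c ∈ Nat.toDigitsCore 10 f n acc, okTok c = true := by
  intro f
  induction f with
  | zero => intro n acc hacc; simpa [Nat.toDigitsCore] using hacc
  | succ g ih =>
    intro n acc hacc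
    have hd : okTok (Nat.digitChar (n % 10)) = true := by
      have h10 : n % 10 < 10 := Nat.mod_lt _ (by norm_num)
      revert h10
      have : ∀ m, m < 10 → okTok (Nat.digitChar m) = true := by decide
      exact this (n % 10)
    rw [Nat.toDigitsCore]
    split
    · intro c hc
      rcases List.mem_cons.mp hc with h | h
      · exact h ▸ hd
      · exact hacc c h
    · exact ih _ _ (fun c hc => by
        rcases List.mem_cons.mp hc with h | h
        · exact h ▸ hd
        · exact hacc c h)

theorem okTok_toChars (idx : Int) (hidx : 0 ≤ idx) :
    ∀ c ∈ PySem.Int.toChars idx, okTok c = true := by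
  rw [PySem.Int.toChars, if_neg (by omega)]
  exact okTok_toDigitsCore _ _ [] (by simp)

theorem okTok_token (idx : Int) (hidx : 0 ≤ idx) :
    ∀ c ∈ ("MATH_PLACEHOLDER_".toList ++ PySem.Int.toChars idx), okTok c = true := by
  intro c hc
  rcases List.mem_append.mp hc with h | h
  · exact List.all_eq_true.mp (by rfl : ("MATH_PLACEHOLDER_".toList.all okTok) = true) c h
  · exact okTok_toChars idx hidx c h

theorem notMem_of_okTok {tok : List Char} (htokP : ∀ c ∈ tok, okTok c = true)
    {c0 : Char} (hc0 : okTok c0 = false) : c0 ∉ tok :=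
  fun hm => by rw [htokP c0 hm] at hc0; cases hc0

-- the replacement markup contains no token characters around the latex payload
theorem rep_shape {pre post lc tok : List Char}
    (hpre : pre ≠ []) (hpreh : pre.head? = some '<')
    (hpost : post ≠ []) (hpostl : post.getLast? = some '>')
    (hprec : pre.all (fun c => !okTok c) = true) (hpostc : post.all (fun c => !okTok c) = true)
    (htokP : ∀ c ∈ tok, okTok c = true) (htok : tok ≠ [])
    (hlatex : ¬ tok <:+: lc) :
    ¬ tok <:+: (pre ++ lc ++ post)
      ∧ (pre ++ lc ++ post).head? = some '<'
      ∧ (pre ++ lc ++ post).getLast? = some '>' := by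
  refine ⟨?_, ?_, ?_⟩
  · intro hinf
    have h1 : tok <:+: pre ++ lc := infix_append_left htok hinf
      (fun c hc hm => by
        have := List.all_eq_true.mp hpostc c hc
        rw [htokP c hm] at this; cases this)
    have h2 : tok <:+: lc := infix_append_right htok h1
      (fun c hc hm => by
        have := List.all_eq_true.mp hprec c hc
        rw [htokP c hm] at this; cases this)
    exact hlatex h2
  · rw [List.append_assoc, List.head?_append_of_ne_nil _ hpre, hpreh]
  · rw [List.getLast?_append_of_ne_nil _ hpost, hpostl]

-- the entity-unescape chain cannot create a token occurrence in the latex payload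
theorem latex_chain {latex : List Char} {tok : List Char}
    (htokpre : "MATH_PLACEHOLDER_".toList <+: tok)
    (hM : ¬ "MATH_PLACEHOLDER_".toList <:+: latex) :
    ¬ tok <:+:
      PySem.Chars.replace (PySem.Chars.replace (PySem.Chars.replace latex
        "&amp;".toList "&".toList) "&lt;".toList "<".toList) "&gt;".toList ">".toList := by
  intro hinf
  have hMne : ("MATH_PLACEHOLDER_".toList : List Char) ≠ [] := by simp
  have hMinf : "MATH_PLACEHOLDER_".toList <:+:
      PySem.Chars.replace (PySem.Chars.replace (PySem.Chars.replace latex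
        "&amp;".toList "&".toList) "&lt;".toList "<".toList) "&gt;".toList ">".toList :=
    htokpre.isInfix.trans hinf
  rw [replace_eq_repl _ _ _ (by simp)] at hMinf
  have h1 := infix_repl hMne (by simp)
    (fun c hc hm => by
      have hcg : c = '>' := by simpa using hc
      revert hm; rw [hcg]; decide) hMinf
  rw [replace_eq_repl _ _ _ (by simp)] at h1
  have h2 := infix_repl hMne (by simp)
    (fun c hc hm => by
      have hcg : c = '<' := by simpa using hc
      revert hm; rw [hcg]; decide) h1
  rw [replace_eq_repl _ _ _ (by simp)] at h2
  have h3 := infix_repl hMne (by simp)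
    (fun c hc hm => by
      have hcg : c = '&' := by simpa using hc
      revert hm; rw [hcg]; decide) h2
  exact hM h3

-- one placeholder, Chars level: A's two replaces equal B's find-driven loop
theorem step_core (tok lc pre post s : List Char)
    (htokP : ∀ c ∈ tok, okTok c = true) (htok : tok ≠ [])
    (hlc : ¬ tok <:+: lc)
    (hpre : pre ≠ []) (hpreh : pre.head? = some '<')
    (hpost : post ≠ []) (hpostl : post.getLast? = some '>')
    (hprec : pre.all (fun c => !okTok c) = true) (hpostc : post.all (fun c => !okTok c) = true) :
    repl tok (pre ++ lc ++ post)
        (repl ('<' :: 'p' :: '>' :: (tok ++ ['<', '/', 'p', '>'])) (pre ++ lc ++ post) s)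
      = (bLoop tok (pre ++ lc ++ post) s (s.length + 1) 0 []).reverse.flatten := by
  obtain ⟨hni, hh, hl⟩ := rep_shape hpre hpreh hpost hpostl hprec hpostc htokP htok hlc
  have hlt : '<' ∉ tok := notMem_of_okTok htokP (by rfl)
  have hgt : '>' ∉ tok := notMem_of_okTok htokP (by rfl)
  have hpt : 'p' ∉ tok := notMem_of_okTok htokP (by rfl)
  rw [fuse_aux _ tok _ (by simp) (by rfl) htok hlt hgt hni hh hl s.length s (le_refl _)]
  rw [bLoop_eq tok _ s htok hlt hgt hpt (s.length + 1) 0 [] (Nat.zero_le _) (by omega)]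
  simp

-- one placeholder, String level, in the exact shape of the two fold bodies
theorem step_eq (hs : String) (idx : Int) (kind latex : String)
    (hidx : 0 ≤ idx) (hlx : PySem.Str.isIn "MATH_PLACEHOLDER_" latex = false) :
    (PySem.Str.replace
        (PySem.Str.replace hs
          ("<p>" ++ ("MATH_PLACEHOLDER_" ++ PySem.Int.toStr idx) ++ "</p>")
          (if kind == "display" then
            "<div class=\"katex-display\">\\[" ++
              PySem.Str.replace (PySem.Str.replace (PySem.Str.replace latex "&amp;" "&") "&lt;" "<") "&gt;" ">" ++ "\\]</div>"
          else
            "<span class=\"katex-inline\">\\(" ++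
              PySem.Str.replace (PySem.Str.replace (PySem.Str.replace latex "&amp;" "&") "&lt;" "<") "&gt;" ">" ++ "\\)</span>"))
        ("MATH_PLACEHOLDER_" ++ PySem.Int.toStr idx)
        (if kind == "display" then
          "<div class=\"katex-display\">\\[" ++
            PySem.Str.replace (PySem.Str.replace (PySem.Str.replace latex "&amp;" "&") "&lt;" "<") "&gt;" ">" ++ "\\]</div>"
        else
          "<span class=\"katex-inline\">\\(" ++
            PySem.Str.replace (PySem.Str.replace (PySem.Str.replace latex "&amp;" "&") "&lt;" "<") "&gt;" ">" ++ "\\)</span>")).toList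
      = (bLoop ("MATH_PLACEHOLDER_".toList ++ PySem.Int.toChars idx)
          (if kind == "display" then
            "<div class=\"katex-display\">\\[".toList ++
              PySem.Chars.replace (PySem.Chars.replace (PySem.Chars.replace latex.toList
                "&amp;".toList "&".toList) "&lt;".toList "<".toList) "&gt;".toList ">".toList
              ++ "\\]</div>".toList
          else
            "<span class=\"katex-inline\">\\(".toList ++
              PySem.Chars.replace (PySem.Chars.replace (PySem.Chars.replace latex.toList
                "&amp;".toList "&".toList) "&lt;".toList "<".toList) "&gt;".toList ">".toList
              ++ "\\)</span>".toList)
          hs.toList (hs.toList.length + 1) 0 []).reverse.flatten := by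
  have htokP : ∀ c ∈ ("MATH_PLACEHOLDER_".toList ++ PySem.Int.toChars idx), okTok c = true :=
    okTok_token idx hidx
  have htok : ("MATH_PLACEHOLDER_".toList ++ PySem.Int.toChars idx) ≠ [] := by simp
  have hMlx : ¬ ("MATH_PLACEHOLDER_".toList <:+: latex.toList) := by
    intro h
    rw [← PySem.Str.isIn_iff_infix] at h
    rw [hlx] at h
    cases h
  have hlc : ¬ ("MATH_PLACEHOLDER_".toList ++ PySem.Int.toChars idx) <:+:
      PySem.Chars.replace (PySem.Chars.replace (PySem.Chars.replace latex.toList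
        "&amp;".toList "&".toList) "&lt;".toList "<".toList) "&gt;".toList ">".toList :=
    latex_chain (List.prefix_append _ _) hMlx
  have hwEq : ("<p>".toList ++ ("MATH_PLACEHOLDER_".toList ++ PySem.Int.toChars idx)) ++ "</p>".toList
      = '<' :: 'p' :: '>' :: (("MATH_PLACEHOLDER_".toList ++ PySem.Int.toChars idx) ++ ['<', '/', 'p', '>']) := by
    simp
  by_cases hk : (kind == "display") = true
  · simp only [hk, if_pos, PySem.Str.toList_replace, String.toList_append, PySem.Int.toList_toStr]
    rw [replace_eq_repl _ (("<p>".toList ++ ("MATH_PLACEHOLDER_".toList ++ PySem.Int.toChars idx)) ++ "</p>".toList) _ (by simp)]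
    rw [replace_eq_repl _ ("MATH_PLACEHOLDER_".toList ++ PySem.Int.toChars idx) _ htok]
    rw [hwEq]
    exact step_core _ _ _ _ _ htokP htok hlc (by simp) (by rfl) (by simp) (by rfl) (by rfl) (by rfl)
  · simp only [hk, if_neg, Bool.false_eq_true, not_false_iff, PySem.Str.toList_replace,
      String.toList_append, PySem.Int.toList_toStr]
    rw [replace_eq_repl _ (("<p>".toList ++ ("MATH_PLACEHOLDER_".toList ++ PySem.Int.toChars idx)) ++ "</p>".toList) _ (by simp)]
    rw [replace_eq_repl _ ("MATH_PLACEHOLDER_".toList ++ PySem.Int.toChars idx) _ htok]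
    rw [hwEq]
    exact step_core _ _ _ _ _ htokP htok hlc (by simp) (by rfl) (by simp) (by rfl) (by rfl) (by rfl)


-- a str.replace whose pattern does not occur returns the string unchanged
theorem Str_replace_noop (hs old new : String) (ho : old.toList ≠ [])
    (h : ¬ old.toList <:+: hs.toList) : PySem.Str.replace hs old new = hs := by
  unfold PySem.Str.replace
  rw [replace_eq_repl _ _ _ ho, repl_id h, String.ofList_toList]

-- one placeholder is a no-op on both sides when the text does not contain the token prefix
theorem step_noop (hs : String) (idx : Int) (R : String) (Rb : List Char)
    (hidx : 0 ≤ idx) (hM : ¬ ("MATH_PLACEHOLDER_".toList <:+: hs.toList)) :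
    PySem.Str.replace (PySem.Str.replace hs
        ("<p>" ++ ("MATH_PLACEHOLDER_" ++ PySem.Int.toStr idx) ++ "</p>") R)
        ("MATH_PLACEHOLDER_" ++ PySem.Int.toStr idx) R = hs
      ∧ (bLoop ("MATH_PLACEHOLDER_".toList ++ PySem.Int.toChars idx) Rb
          hs.toList (hs.toList.length + 1) 0 []).reverse.flatten = hs.toList := by
  have htokP : ∀ c ∈ ("MATH_PLACEHOLDER_".toList ++ PySem.Int.toChars idx), okTok c = true :=
    okTok_token idx hidx
  have htok : ("MATH_PLACEHOLDER_".toList ++ PySem.Int.toChars idx) ≠ [] := by simp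
  have htinf : ¬ (("MATH_PLACEHOLDER_".toList ++ PySem.Int.toChars idx) <:+: hs.toList) :=
    fun hi => hM ((List.prefix_append _ _).isInfix.trans hi)
  constructor
  · rw [Str_replace_noop hs _ R (by simp) ?hw, Str_replace_noop hs _ R (by simp)
      (by simpa [PySem.Int.toList_toStr] using htinf)]
    case hw =>
      intro hi
      apply htinf
      refine List.IsInfix.trans ?_ hi
      simp only [String.toList_append, PySem.Int.toList_toStr]
      exact ⟨"<p>".toList, "</p>".toList, by simp⟩
  · rw [bLoop_eq _ _ hs.toList htok (notMem_of_okTok htokP (by rfl))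
      (notMem_of_okTok htokP (by rfl)) (notMem_of_okTok htokP (by rfl))
      (hs.toList.length + 1) 0 [] (Nat.zero_le _) (by omega)]
    simp only [List.drop_zero, List.reverse_nil, List.flatten_nil, List.nil_append]
    exact scanC_id (w := '<' :: 'p' :: '>' :: ("MATH_PLACEHOLDER_".toList ++ PySem.Int.toChars idx ++ ['<', '/', 'p', '>'])) ['<', 'p', '>'] ['<', '/', 'p', '>'] rfl htinf

-- ===== VERDICT (by name: the statement is the Claim_ definition above) =====
set_option maxHeartbeats 2000000 in
theorem restore_math_spec : Claim_equal_restore_math := by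
  intro html_text placeholders _hdom hpre
  unfold Spec_restore_math restore_math restore_math_alt
  rcases hpre with hpre | hhtml
  case inr =>
    -- the html never contains the token prefix: every placeholder step is a no-op on both sides
    have hM : ¬ ("MATH_PLACEHOLDER_".toList <:+: html_text.toList) := by
      intro h
      rw [← PySem.Str.isIn_iff_infix] at h
      rw [hhtml] at h
      cases h
    have hmem0 : ∀ pr ∈ PySem.List.enumerate placeholders 0, 0 ≤ pr.1 := by
      intro pr hm
      obtain ⟨k, hk, rfl⟩ := (PySem.List.mem_enumerate_iff placeholders 0 pr).mp hm
      simp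
    suffices H : ∀ (l : List (Int × (String × String))), (∀ pr ∈ l, 0 ≤ pr.1) →
        List.foldl (fun h (pr : Int × (String × String)) =>
            let token : String := "MATH_PLACEHOLDER_" ++ PySem.Int.toStr pr.1
            let latex_clean : String :=
              PySem.Str.replace (PySem.Str.replace (PySem.Str.replace pr.2.2 "&amp;" "&") "&lt;" "<") "&gt;" ">"
            let replacement : String :=
              if pr.2.1 == "display" then
                "<div class=\"katex-display\">\\[" ++ latex_clean ++ "\\]</div>"
              else
                "<span class=\"katex-inline\">\\(" ++ latex_clean ++ "\\)</span>"
            PySem.Str.replace (PySem.Str.replace h ("<p>" ++ token ++ "</p>") replacement) token replacement)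
          html_text l = html_text
        ∧ List.foldl (fun h (pr : Int × (String × String)) =>
            let latex_clean : List Char :=
              PySem.Chars.replace (PySem.Chars.replace (PySem.Chars.replace pr.2.2.toList
                "&amp;".toList "&".toList) "&lt;".toList "<".toList) "&gt;".toList ">".toList
            let rep : List Char :=
              if pr.2.1 == "display" then
                "<div class=\"katex-display\">\\[".toList ++ latex_clean ++ "\\]</div>".toList
              else
                "<span class=\"katex-inline\">\\(".toList ++ latex_clean ++ "\\)</span>".toList
            let tok : List Char := "MATH_PLACEHOLDER_".toList ++ PySem.Int.toChars pr.1
            (bLoop tok rep h (h.length + 1) 0 []).reverse.flatten)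
          html_text.toList l = html_text.toList by
      rw [(H _ hmem0).1, (H _ hmem0).2, String.ofList_toList]
    intro l
    induction l with
    | nil => intro _; exact ⟨rfl, rfl⟩
    | cons pr rest ih =>
      intro hcond
      have h1 := hcond pr List.mem_cons_self
      obtain ⟨idx, kind, latex⟩ := pr
      obtain ⟨hA, hB⟩ := step_noop html_text idx
        (if kind == "display" then
          "<div class=\"katex-display\">\\[" ++
            PySem.Str.replace (PySem.Str.replace (PySem.Str.replace latex "&amp;" "&") "&lt;" "<") "&gt;" ">" ++ "\\]</div>"
        else
          "<span class=\"katex-inline\">\\(" ++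
            PySem.Str.replace (PySem.Str.replace (PySem.Str.replace latex "&amp;" "&") "&lt;" "<") "&gt;" ">" ++ "\\)</span>")
        (if kind == "display" then
          "<div class=\"katex-display\">\\[".toList ++
            PySem.Chars.replace (PySem.Chars.replace (PySem.Chars.replace latex.toList
              "&amp;".toList "&".toList) "&lt;".toList "<".toList) "&gt;".toList ">".toList
            ++ "\\]</div>".toList
        else
          "<span class=\"katex-inline\">\\(".toList ++
            PySem.Chars.replace (PySem.Chars.replace (PySem.Chars.replace latex.toList
              "&amp;".toList "&".toList) "&lt;".toList "<".toList) "&gt;".toList ">".toList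
            ++ "\\)</span>".toList)
        h1 hM
      rw [List.foldl_cons, List.foldl_cons]
      refine ⟨?_, ?_⟩
      · rw [hA]
        exact (ih (fun q hq => hcond q (List.mem_cons_of_mem _ hq))).1
      · rw [hB]
        exact (ih (fun q hq => hcond q (List.mem_cons_of_mem _ hq))).2
  have hmem : ∀ pr ∈ PySem.List.enumerate placeholders 0,
      0 ≤ pr.1 ∧ PySem.Str.isIn "MATH_PLACEHOLDER_" pr.2.2 = false := by
    intro pr hm
    obtain ⟨k, hk, rfl⟩ := (PySem.List.mem_enumerate_iff placeholders 0 pr).mp hm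
    exact ⟨by simp, hpre _ (List.getElem_mem hk)⟩
  suffices H : ∀ (l : List (Int × (String × String))),
      (∀ pr ∈ l, 0 ≤ pr.1 ∧ PySem.Str.isIn "MATH_PLACEHOLDER_" pr.2.2 = false) →
      ∀ (hs : String),
      List.foldl (fun h (pr : Int × (String × String)) =>
          let token : String := "MATH_PLACEHOLDER_" ++ PySem.Int.toStr pr.1
          let latex_clean : String :=
            PySem.Str.replace (PySem.Str.replace (PySem.Str.replace pr.2.2 "&amp;" "&") "&lt;" "<") "&gt;" ">"
          let replacement : String :=
            if pr.2.1 == "display" then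
              "<div class=\"katex-display\">\\[" ++ latex_clean ++ "\\]</div>"
            else
              "<span class=\"katex-inline\">\\(" ++ latex_clean ++ "\\)</span>"
          PySem.Str.replace (PySem.Str.replace h ("<p>" ++ token ++ "</p>") replacement) token replacement)
        hs l
        = String.ofList (List.foldl (fun h (pr : Int × (String × String)) =>
            let latex_clean : List Char :=
              PySem.Chars.replace (PySem.Chars.replace (PySem.Chars.replace pr.2.2.toList
                "&amp;".toList "&".toList) "&lt;".toList "<".toList) "&gt;".toList ">".toList
            let rep : List Char :=
              if pr.2.1 == "display" then
                "<div class=\"katex-display\">\\[".toList ++ latex_clean ++ "\\]</div>".toList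
              else
                "<span class=\"katex-inline\">\\(".toList ++ latex_clean ++ "\\)</span>".toList
            let tok : List Char := "MATH_PLACEHOLDER_".toList ++ PySem.Int.toChars pr.1
            (bLoop tok rep h (h.length + 1) 0 []).reverse.flatten)
          hs.toList l) by
    exact H _ hmem html_text
  intro l
  induction l with
  | nil => intro _ hs; simp [String.ofList_toList]
  | cons pr rest ih =>
    intro hcond hs
    rw [List.foldl_cons, List.foldl_cons]
    rw [ih (fun q hq => hcond q (List.mem_cons_of_mem pr hq))]
    obtain ⟨h1, h2⟩ := hcond pr List.mem_cons_self
    obtain ⟨idx, kind, latex⟩ := pr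
    rw [step_eq hs idx kind latex h1 h2]
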